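-- pv_equiv track=rewrite | github.com/pranavagrawal321/Leetcode | Minimum number of Coins - GFG/Minimum number of Coins - GFG.py | minPartition
-- ===== SOURCE A (Python) =====
-- def minPartition(n):
--     # code here
--     ans = []
--     currency = [2000, 500, 200, 100, 50, 20, 10, 5, 2]
--
--     for i in currency:
--         while n >= i:
--             ans.append(i)
--             n -= i
--
--     while n > 0:
--         ans.append(1)
--         n -= 1
--
--     return ans
-- ===== SOURCE B (Python) =====
-- def minPartition(n):
--     if n <= 0:
--         return []
--     c = next(d for d in (2000, 500, 200, 100, 50, 20, 10, 5, 2, 1) if d <= n)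
--     q, r = divmod(n, c)
--     return [c] * q + minPartition(r)
-- ===== Notes on version B (the rewrite author's own statement) =====
-- stated objective: alternative
-- what changed: Recursive greedy: selects the largest denomination not exceeding n, emits its whole block at once by one divmod and list replication, and recurses on the remainder, instead of A's iteration over the denomination list with unit-by-unit subtraction loops.
import Mathlib
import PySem

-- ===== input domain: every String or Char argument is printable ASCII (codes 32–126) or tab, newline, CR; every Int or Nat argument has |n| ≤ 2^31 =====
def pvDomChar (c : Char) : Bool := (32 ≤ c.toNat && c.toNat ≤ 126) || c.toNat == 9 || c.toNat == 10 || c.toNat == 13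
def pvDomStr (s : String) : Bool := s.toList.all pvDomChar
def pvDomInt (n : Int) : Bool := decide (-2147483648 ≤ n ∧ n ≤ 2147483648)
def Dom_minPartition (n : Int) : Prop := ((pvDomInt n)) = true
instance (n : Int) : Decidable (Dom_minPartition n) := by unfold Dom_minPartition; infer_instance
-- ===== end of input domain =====

-- B re-derives the coin list recursively: largest denomination ≤ n, one divmod emits its whole block, recurse on the remainder — replacing A's iteration over the list with unit-by-unit subtraction loops; objective: alternative (same coin list).


-- ===== PORT A =====
-- while n >= i: ans.append(i); n -= i   (0 < i is a totality guard only; every denomination used is positive)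
def pvWhileGe (i : Int) (n : Int) (acc : List Int) : List Int × Int :=
  if _h : i ≤ n ∧ 0 < i then pvWhileGe i (n - i) (acc ++ [i]) else (acc, n)
termination_by n.toNat
decreasing_by omega

-- while n > 0: ans.append(1); n -= 1
def pvOnes (n : Int) (acc : List Int) : List Int :=
  if _h : 0 < n then pvOnes (n - 1) (acc ++ [1]) else acc
termination_by n.toNat
decreasing_by omega

def minPartition (n : Int) : List Int :=
  let s := List.foldl (fun (p : List Int × Int) i => pvWhileGe i p.2 p.1)
            (([] : List Int), n) [2000, 500, 200, 100, 50, 20, 10, 5, 2]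
  pvOnes s.2 s.1

-- ===== PORT B =====
def pvCoins : List Int := [2000, 500, 200, 100, 50, 20, 10, 5, 2, 1]

-- next(d for d in COINS if d <= n); the getD 0 default is unreachable under the 0 < n guard (coin 1 always matches)
def pvFirstCoin (n : Int) : Int := (pvCoins.find? (fun d => d ≤ n)).getD 0

-- characterisation of pvFirstCoin, cited by the port's decreasing_by
lemma pvFirstCoin_eq (n : Int) : pvFirstCoin n =
    if 2000 ≤ n then 2000 else if 500 ≤ n then 500 else if 200 ≤ n then 200
    else if 100 ≤ n then 100 else if 50 ≤ n then 50 else if 20 ≤ n then 20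
    else if 10 ≤ n then 10 else if 5 ≤ n then 5 else if 2 ≤ n then 2
    else if 1 ≤ n then 1 else 0 := by
  unfold pvFirstCoin pvCoins
  by_cases h0 : (2000:Int) ≤ n
  · rw [List.find?_cons_of_pos (by simpa using h0)]; simp [h0]
  · rw [List.find?_cons_of_neg (by simpa using h0), if_neg h0]
    by_cases h1 : (500:Int) ≤ n
    · rw [List.find?_cons_of_pos (by simpa using h1)]; simp [h1]
    · rw [List.find?_cons_of_neg (by simpa using h1), if_neg h1]
      by_cases h2 : (200:Int) ≤ n
      · rw [List.find?_cons_of_pos (by simpa using h2)]; simp [h2]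
      · rw [List.find?_cons_of_neg (by simpa using h2), if_neg h2]
        by_cases h3 : (100:Int) ≤ n
        · rw [List.find?_cons_of_pos (by simpa using h3)]; simp [h3]
        · rw [List.find?_cons_of_neg (by simpa using h3), if_neg h3]
          by_cases h4 : (50:Int) ≤ n
          · rw [List.find?_cons_of_pos (by simpa using h4)]; simp [h4]
          · rw [List.find?_cons_of_neg (by simpa using h4), if_neg h4]
            by_cases h5 : (20:Int) ≤ n
            · rw [List.find?_cons_of_pos (by simpa using h5)]; simp [h5]
            · rw [List.find?_cons_of_neg (by simpa using h5), if_neg h5]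
              by_cases h6 : (10:Int) ≤ n
              · rw [List.find?_cons_of_pos (by simpa using h6)]; simp [h6]
              · rw [List.find?_cons_of_neg (by simpa using h6), if_neg h6]
                by_cases h7 : (5:Int) ≤ n
                · rw [List.find?_cons_of_pos (by simpa using h7)]; simp [h7]
                · rw [List.find?_cons_of_neg (by simpa using h7), if_neg h7]
                  by_cases h8 : (2:Int) ≤ n
                  · rw [List.find?_cons_of_pos (by simpa using h8)]; simp [h8]
                  · rw [List.find?_cons_of_neg (by simpa using h8), if_neg h8]
                    by_cases h9 : (1:Int) ≤ n
                    · rw [List.find?_cons_of_pos (by simpa using h9)]; simp [h9]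
                    · rw [List.find?_cons_of_neg (by simpa using h9), if_neg h9]
                      simp

lemma pvFirstCoin_bounds (n : Int) (h : 0 < n) :
    0 < pvFirstCoin n ∧ pvFirstCoin n ≤ n := by
  rw [pvFirstCoin_eq]
  split_ifs <;> omega

def minPartition_alt (n : Int) : List Int :=
  if _h : n ≤ 0 then []
  else
    let c := pvFirstCoin n
    List.replicate (PySem.Int.floordiv n c).toNat c ++ minPartition_alt (PySem.Int.mod n c)
termination_by n.toNat
decreasing_by
  have hb := pvFirstCoin_bounds n (by omega)
  have h0 := PySem.Int.mod_nonneg n hb.1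
  have h1 := PySem.Int.mod_lt n hb.1
  omega

-- ===== PRECONDITION & SPEC =====
def Spec_minPartition (n : Int) (out : List Int) : Prop := out = minPartition_alt n
instance (n : Int) (out : List Int) : Decidable (Spec_minPartition n out) := by unfold Spec_minPartition; infer_instance

-- ===== CLAIM (what is proved, stated in full; the proofs are below) =====
def Claim_equal_minPartition : Prop := ∀ (n : Int), Dom_minPartition n → Spec_minPartition n (minPartition n)

-- ===== LEMMAS AND PROOFS =====

-- one step of B's divmod (used only to RELATE the two ports in the proof)
def pvBStep (p : List Int × Int) (i : Int) : List Int × Int :=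
  if i ≤ p.2 then
    (p.1 ++ List.replicate (PySem.Int.floordiv p.2 i).toNat i, PySem.Int.mod p.2 i)
  else p

lemma pvWhileGe_aux (i : Int) (hi : 0 < i) :
    ∀ (m : Nat) (n : Int) (acc : List Int), 0 ≤ n → n.toNat = m →
      pvWhileGe i n acc = pvBStep (acc, n) i := by
  intro m
  induction m using Nat.strong_induction_on with
  | _ m ih =>
  intro n acc hn hm
  rw [pvWhileGe]
  by_cases hin : i ≤ n
  · rw [dif_pos ⟨hin, hi⟩]
    rw [ih (n - i).toNat (by omega) (n - i) (acc ++ [i]) (by omega) rfl]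
    unfold pvBStep
    by_cases h2 : i ≤ n - i
    · simp only [hin, h2, if_pos]
      have hb1 : PySem.Int.floordiv (n - i) i * i ≤ n - i ∧
          n - i < (PySem.Int.floordiv (n - i) i + 1) * i :=
        (PySem.Int.floordiv_eq_iff_of_pos hi).mp rfl
      have hq0 : 0 ≤ PySem.Int.floordiv (n - i) i := by nlinarith [hb1.1, hb1.2]
      have hq : PySem.Int.floordiv n i = PySem.Int.floordiv (n - i) i + 1 := by
        rw [PySem.Int.floordiv_eq_iff_of_pos hi]
        constructor <;> nlinarith [hb1.1, hb1.2]
      have hr : PySem.Int.mod n i = PySem.Int.mod (n - i) i := by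
        have e1 := PySem.Int.floordiv_mul_add_mod n i
        have e2 := PySem.Int.floordiv_mul_add_mod (n - i) i
        rw [hq] at e1
        nlinarith [e1, e2]
      have ht : (PySem.Int.floordiv (n - i) i + 1).toNat
          = (PySem.Int.floordiv (n - i) i).toNat + 1 := by omega
      rw [hq, hr, ht, List.replicate_succ]
      simp
    · simp only [hin, if_pos, h2, if_false]
      have hq : PySem.Int.floordiv n i = 1 := by
        rw [PySem.Int.floordiv_eq_iff_of_pos hi]
        constructor <;> nlinarith
      have hr : PySem.Int.mod n i = n - i := by
        have e1 := PySem.Int.floordiv_mul_add_mod n i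
        rw [hq] at e1
        omega
      rw [hq, hr]
      simp
  · rw [dif_neg (by exact fun h => hin h.1)]
    unfold pvBStep
    rw [if_neg hin]

lemma pvWhileGe_eq_bstep (i : Int) (hi : 0 < i) (n : Int) (acc : List Int) (hn : 0 ≤ n) :
    pvWhileGe i n acc = pvBStep (acc, n) i :=
  pvWhileGe_aux i hi n.toNat n acc hn rfl

lemma pvOnes_aux : ∀ (m : Nat) (n : Int) (acc : List Int), n.toNat = m →
    pvOnes n acc = acc ++ List.replicate n.toNat 1 := by
  intro m
  induction m using Nat.strong_induction_on with
  | _ m ih =>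
  intro n acc hm
  rw [pvOnes]
  by_cases h : 0 < n
  · rw [dif_pos h, ih (n - 1).toNat (by omega) (n - 1) (acc ++ [1]) rfl]
    have : n.toNat = (n - 1).toNat + 1 := by omega
    rw [this, List.replicate_succ]
    simp
  · rw [dif_neg h]
    have : n.toNat = 0 := by omega
    rw [this]
    simp

lemma pvOnes_eq (n : Int) (acc : List Int) (hn : 0 ≤ n) :
    pvOnes n acc = (pvBStep (acc, n) 1).1 := by
  rw [pvOnes_aux n.toNat n acc rfl]
  unfold pvBStep
  by_cases h : (1 : Int) ≤ n
  · have hq : PySem.Int.floordiv n 1 = n := by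
      rw [PySem.Int.floordiv_eq_iff_of_pos (by norm_num)]
      constructor <;> nlinarith
    rw [if_pos h, hq]
  · rw [if_neg h]
    have : n.toNat = 0 := by omega
    simp [this]

lemma pvBStep_snd_nonneg (p : List Int × Int) (i : Int) (hi : 0 < i) (h : 0 ≤ p.2) :
    0 ≤ (pvBStep p i).2 := by
  unfold pvBStep
  split
  · exact PySem.Int.mod_nonneg _ hi
  · exact h

-- A's computation, rephrased as the divmod fold over the full coin list
lemma pvA_eq_fold (n : Int) (hn : 0 ≤ n) :
    minPartition n = (List.foldl pvBStep (([] : List Int), n) pvCoins).1 := by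
  unfold minPartition pvCoins
  simp only [List.foldl]
  rw [pvWhileGe_eq_bstep 2000 (by norm_num) _ _ hn]
  have h1 := pvBStep_snd_nonneg ([], n) 2000 (by norm_num) hn
  rw [pvWhileGe_eq_bstep 500 (by norm_num) _ _ h1]
  have h2 := pvBStep_snd_nonneg _ 500 (by norm_num) h1
  rw [pvWhileGe_eq_bstep 200 (by norm_num) _ _ h2]
  have h3 := pvBStep_snd_nonneg _ 200 (by norm_num) h2
  rw [pvWhileGe_eq_bstep 100 (by norm_num) _ _ h3]
  have h4 := pvBStep_snd_nonneg _ 100 (by norm_num) h3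
  rw [pvWhileGe_eq_bstep 50 (by norm_num) _ _ h4]
  have h5 := pvBStep_snd_nonneg _ 50 (by norm_num) h4
  rw [pvWhileGe_eq_bstep 20 (by norm_num) _ _ h5]
  have h6 := pvBStep_snd_nonneg _ 20 (by norm_num) h5
  rw [pvWhileGe_eq_bstep 10 (by norm_num) _ _ h6]
  have h7 := pvBStep_snd_nonneg _ 10 (by norm_num) h6
  rw [pvWhileGe_eq_bstep 5 (by norm_num) _ _ h7]
  have h8 := pvBStep_snd_nonneg _ 5 (by norm_num) h7
  rw [pvWhileGe_eq_bstep 2 (by norm_num) _ _ h8]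
  have h9 := pvBStep_snd_nonneg _ 2 (by norm_num) h8
  rw [pvOnes_eq _ _ h9]

lemma pvFold_skip (cs : List Int) : ∀ (acc : List Int) (n : Int),
    (∀ i ∈ cs, n < i) → List.foldl pvBStep (acc, n) cs = (acc, n) := by
  induction cs with
  | nil => intro acc n _; rfl
  | cons i cs ih =>
    intro acc n h
    simp only [List.foldl_cons]
    rw [show pvBStep (acc, n) i = (acc, n) from by
      unfold pvBStep; rw [if_neg (by have := h i (by simp); omega)]]
    exact ih acc n (fun j hj => h j (by simp [hj]))

lemma pvFold_extract (cs : List Int) : ∀ (acc : List Int) (n : Int),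
    List.foldl pvBStep (acc, n) cs
      = (acc ++ (List.foldl pvBStep (([] : List Int), n) cs).1,
         (List.foldl pvBStep (([] : List Int), n) cs).2) := by
  induction cs with
  | nil => intro acc n; simp
  | cons i cs ih =>
    intro acc n
    simp only [List.foldl_cons]
    by_cases h : i ≤ n
    · rw [show pvBStep (acc, n) i
          = (acc ++ List.replicate (PySem.Int.floordiv n i).toNat i, PySem.Int.mod n i) from by
        unfold pvBStep; rw [if_pos h]]
      rw [show pvBStep (([] : List Int), n) i
          = (List.replicate (PySem.Int.floordiv n i).toNat i, PySem.Int.mod n i) from by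
        unfold pvBStep; rw [if_pos h]; simp]
      rw [ih (acc ++ List.replicate (PySem.Int.floordiv n i).toNat i),
          ih (List.replicate (PySem.Int.floordiv n i).toNat i)]
      simp
    · rw [show pvBStep (acc, n) i = (acc, n) from by unfold pvBStep; rw [if_neg h]]
      rw [show pvBStep (([] : List Int), n) i = (([] : List Int), n) from by
        unfold pvBStep; rw [if_neg h]]
      rw [ih acc]

lemma pvFold_step (big small : List Int) (c n : Int) (hc0 : 0 < c) (hcn : c ≤ n)
    (hbig : ∀ i ∈ big, n < i) :
    (List.foldl pvBStep (([] : List Int), n) (big ++ c :: small)).1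
      = List.replicate (PySem.Int.floordiv n c).toNat c
        ++ (List.foldl pvBStep (([] : List Int), PySem.Int.mod n c) (big ++ c :: small)).1 := by
  have hr0 : 0 ≤ PySem.Int.mod n c := PySem.Int.mod_nonneg n hc0
  have hrc : PySem.Int.mod n c < c := PySem.Int.mod_lt n hc0
  rw [List.foldl_append, pvFold_skip big [] n hbig]
  rw [List.foldl_append, pvFold_skip big [] (PySem.Int.mod n c)
    (fun i hi => by have := hbig i hi; omega)]
  simp only [List.foldl_cons]
  rw [show pvBStep (([] : List Int), n) c
      = (List.replicate (PySem.Int.floordiv n c).toNat c, PySem.Int.mod n c) from by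
    unfold pvBStep; rw [if_pos hcn]; simp]
  rw [show pvBStep (([] : List Int), PySem.Int.mod n c) c = (([] : List Int), PySem.Int.mod n c) from by
    unfold pvBStep; rw [if_neg (by omega)]]
  rw [pvFold_extract small (List.replicate (PySem.Int.floordiv n c).toNat c)]

-- one range case of the main induction
lemma pvCase (m : Nat)
    (ih : ∀ k, k < m → ∀ n : Int, 0 ≤ n → n.toNat = k →
        (List.foldl pvBStep (([] : List Int), n) pvCoins).1 = minPartition_alt n)
    (big small : List Int) (c n : Int) (hm : n.toNat = m)
    (hsplit : big ++ c :: small = pvCoins) (hc0 : 0 < c) (hcn : c ≤ n)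
    (hbig : ∀ i ∈ big, n < i) (hfirst : pvFirstCoin n = c) :
    (List.foldl pvBStep (([] : List Int), n) pvCoins).1 = minPartition_alt n := by
  have hr0 : 0 ≤ PySem.Int.mod n c := PySem.Int.mod_nonneg n hc0
  have hrc : PySem.Int.mod n c < c := PySem.Int.mod_lt n hc0
  rw [← hsplit, pvFold_step big small c n hc0 hcn hbig, hsplit]
  rw [ih (PySem.Int.mod n c).toNat (by omega) _ hr0 rfl]
  conv_rhs => rw [minPartition_alt]
  rw [dif_neg (by omega : ¬ n ≤ 0)]
  simp only [hfirst]

lemma pvFold_eq_alt : ∀ (m : Nat) (n : Int), 0 ≤ n → n.toNat = m →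
    (List.foldl pvBStep (([] : List Int), n) pvCoins).1 = minPartition_alt n := by
  intro m
  induction m using Nat.strong_induction_on with
  | _ m ih =>
  intro n hn hm
  by_cases h0 : n ≤ 0
  · rw [pvFold_skip pvCoins [] n (by intro i hi; fin_cases hi <;> omega)]
    rw [minPartition_alt, dif_pos h0]
  · have hfc := pvFirstCoin_eq n
    split_ifs at hfc with h1 h2 h3 h4 h5 h6 h7 h8 h9 h10
    · exact pvCase m ih ([] : List Int) ([500, 200, 100, 50, 20, 10, 5, 2, 1] : List Int) 2000 n hm rfl (by norm_num) h1 (by simp) hfc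
    · exact pvCase m ih ([2000] : List Int) ([200, 100, 50, 20, 10, 5, 2, 1] : List Int) 500 n hm rfl (by norm_num) h2 (by intro i hi; fin_cases hi <;> omega) hfc
    · exact pvCase m ih ([2000, 500] : List Int) ([100, 50, 20, 10, 5, 2, 1] : List Int) 200 n hm rfl (by norm_num) h3 (by intro i hi; fin_cases hi <;> omega) hfc
    · exact pvCase m ih ([2000, 500, 200] : List Int) ([50, 20, 10, 5, 2, 1] : List Int) 100 n hm rfl (by norm_num) h4 (by intro i hi; fin_cases hi <;> omega) hfc
    · exact pvCase m ih ([2000, 500, 200, 100] : List Int) ([20, 10, 5, 2, 1] : List Int) 50 n hm rfl (by norm_num) h5 (by intro i hi; fin_cases hi <;> omega) hfc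
    · exact pvCase m ih ([2000, 500, 200, 100, 50] : List Int) ([10, 5, 2, 1] : List Int) 20 n hm rfl (by norm_num) h6 (by intro i hi; fin_cases hi <;> omega) hfc
    · exact pvCase m ih ([2000, 500, 200, 100, 50, 20] : List Int) ([5, 2, 1] : List Int) 10 n hm rfl (by norm_num) h7 (by intro i hi; fin_cases hi <;> omega) hfc
    · exact pvCase m ih ([2000, 500, 200, 100, 50, 20, 10] : List Int) ([2, 1] : List Int) 5 n hm rfl (by norm_num) h8 (by intro i hi; fin_cases hi <;> omega) hfc
    · exact pvCase m ih ([2000, 500, 200, 100, 50, 20, 10, 5] : List Int) ([1] : List Int) 2 n hm rfl (by norm_num) h9 (by intro i hi; fin_cases hi <;> omega) hfc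
    · exact pvCase m ih ([2000, 500, 200, 100, 50, 20, 10, 5, 2] : List Int) ([] : List Int) 1 n hm rfl (by norm_num) h10 (by intro i hi; fin_cases hi <;> omega) hfc
    · omega

-- ===== VERDICT (by name: the statement is the Claim_ definition above) =====
theorem minPartition_spec : Claim_equal_minPartition := by
  intro n _
  unfold Spec_minPartition
  by_cases hn : 0 ≤ n
  · rw [pvA_eq_fold n hn, pvFold_eq_alt n.toNat n hn rfl]
  · have step : ∀ i : Int, 0 < i → ∀ acc, pvWhileGe i n acc = (acc, n) := by
      intro i hi acc
      rw [pvWhileGe, dif_neg (by omega)]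
    unfold minPartition
    simp only [List.foldl]
    rw [step 2000 (by norm_num), step 500 (by norm_num), step 200 (by norm_num),
        step 100 (by norm_num), step 50 (by norm_num), step 20 (by norm_num),
        step 10 (by norm_num), step 5 (by norm_num), step 2 (by norm_num)]
    rw [pvOnes, dif_neg (by omega), minPartition_alt, dif_pos (by omega)]
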